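-- pv_equiv track=rewrite | github.com/misiakw/AoC | AoC2020/day17.py | buildAddressSet
-- ===== SOURCE A (Python) =====
-- def buildAddressSet(arr):
--     if len(arr) == 1:
--             return [str(x) for x in range(arr[0][0], arr[0][1]+1)]
--     tail = buildAddressSet(arr[:-1])
--     result = []
--     for r in range(arr[-1][0], arr[-1][1]+1):
--         for t in tail:
--             result.append(t+","+str(r))
--     return result
-- ===== SOURCE B (Python) =====
-- def buildAddressSet(arr):
--     result = [str(x) for x in range(arr[0][0], arr[0][1] + 1)]
--     for lo, hi in arr[1:]:
--         result = [t + "," + str(r) for r in range(lo, hi + 1) for t in result]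
--     return result
-- ===== Notes on version B (the rewrite author's own statement) =====
-- stated objective: simpler
-- what changed: Replaces the back-to-front recursion with a single left-to-right fold: seed the result from dimension 0, then extend it once per remaining dimension with a flat comprehension.
import Mathlib
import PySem

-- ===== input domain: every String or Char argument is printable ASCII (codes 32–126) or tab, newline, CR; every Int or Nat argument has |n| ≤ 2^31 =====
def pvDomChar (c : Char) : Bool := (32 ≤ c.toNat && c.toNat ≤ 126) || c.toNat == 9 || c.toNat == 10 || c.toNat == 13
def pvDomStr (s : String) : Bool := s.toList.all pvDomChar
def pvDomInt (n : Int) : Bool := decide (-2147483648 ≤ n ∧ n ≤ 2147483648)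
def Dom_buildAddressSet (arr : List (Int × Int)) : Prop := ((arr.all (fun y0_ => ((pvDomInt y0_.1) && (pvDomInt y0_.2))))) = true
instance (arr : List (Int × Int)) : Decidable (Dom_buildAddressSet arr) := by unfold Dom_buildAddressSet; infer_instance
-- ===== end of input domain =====

-- B replaces A's back-to-front recursion by one left-to-right fold over the dimensions (simpler).
-- On [] both Pythons raise (A: RecursionError, B: IndexError); Pre_ excludes it.

-- ===== PORT A =====
def buildAddressSet (arr : List (Int × Int)) : List String :=
  if h1 : arr.length = 1 then
    -- [str(x) for x in range(arr[0][0], arr[0][1]+1)]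
    (PySem.List.pyRange (arr.headD (0, 0)).1 ((arr.headD (0, 0)).2 + 1) 1).map PySem.Int.toStr
  else if h2 : arr = [] then [] -- totality guard only: Python recurses forever here (RecursionError); excluded by Pre_
  else
    let tail := buildAddressSet arr.dropLast   -- arr[:-1]
    let last := arr.getLastD (0, 0)            -- arr[-1] (arr ≠ [] here)
    (PySem.List.pyRange last.1 (last.2 + 1) 1).foldl
      (fun result r => result ++ tail.map (fun t => t ++ "," ++ PySem.Int.toStr r)) []
termination_by arr.length
decreasing_by
  have := List.length_pos_of_ne_nil h2
  simp only [List.length_dropLast]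
  omega

-- ===== PORT B =====
def buildAddressSet_alt (arr : List (Int × Int)) : List String :=
  match arr with
  | [] => [] -- Python raises IndexError on arr[0]; excluded by Pre_
  | (lo, hi) :: rest =>
    rest.foldl
      (fun result p =>
        (PySem.List.pyRange p.1 (p.2 + 1) 1).flatMap
          (fun r => result.map (fun t => t ++ "," ++ PySem.Int.toStr r)))
      ((PySem.List.pyRange lo (hi + 1) 1).map PySem.Int.toStr)

-- ===== PRECONDITION & SPEC =====
-- Pre_ excludes only the empty list, on which both Pythons raise (A RecursionError, B IndexError).
def Pre_buildAddressSet (arr : List (Int × Int)) : Prop := arr ≠ []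
instance (arr : List (Int × Int)) : Decidable (Pre_buildAddressSet arr) := by unfold Pre_buildAddressSet; infer_instance
def pvWitness_buildAddressSet : (List (Int × Int)) := [(0, 2), (-1, 1)]

def Spec_buildAddressSet (arr : List (Int × Int)) (out : List String) : Prop := out = buildAddressSet_alt arr
instance (arr : List (Int × Int)) (out : List String) : Decidable (Spec_buildAddressSet arr out) := by unfold Spec_buildAddressSet; infer_instance

-- ===== CLAIM (what is proved, stated in full; the proofs are below) =====
def Claim_equal_buildAddressSet : Prop := ∀ (arr : List (Int × Int)), Dom_buildAddressSet arr → Pre_buildAddressSet arr → Spec_buildAddressSet arr (buildAddressSet arr)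

-- ===== LEMMAS AND PROOFS =====

-- the per-dimension extension step shared by both ports (after the loop-shape rewrite)
def pvStep (result : List String) (p : Int × Int) : List String :=
  (PySem.List.pyRange p.1 (p.2 + 1) 1).flatMap
    (fun r => result.map (fun t => t ++ "," ++ PySem.Int.toStr r))

theorem pv_foldl_append {α β : Type} (f : α → List β) (xs : List α) (acc : List β) :
    xs.foldl (fun res r => res ++ f r) acc = acc ++ xs.flatMap f := by
  induction xs generalizing acc with
  | nil => simp
  | cons x xs ih => simp [List.foldl, ih]

theorem pv_alt_cons (x : Int × Int) (rest : List (Int × Int)) :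
    buildAddressSet_alt (x :: rest) =
      rest.foldl pvStep ((PySem.List.pyRange x.1 (x.2 + 1) 1).map PySem.Int.toStr) := by
  cases x; rfl

theorem pv_A_cons (x : Int × Int) (rest : List (Int × Int)) :
    buildAddressSet (x :: rest) =
      rest.foldl pvStep ((PySem.List.pyRange x.1 (x.2 + 1) 1).map PySem.Int.toStr) := by
  induction rest using List.reverseRecOn with
  | nil => rw [buildAddressSet.eq_def]; simp
  | append_singleton rest y ih =>
    have hlen : (x :: (rest ++ [y])).length ≠ 1 := by simp
    have hne : (x :: (rest ++ [y])) ≠ [] := by simp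
    have hdrop : (x :: (rest ++ [y])).dropLast = x :: rest := by
      rw [← List.cons_append]; exact List.dropLast_concat
    have hlast : (x :: (rest ++ [y])).getLastD (0, 0) = y := by
      rw [← List.cons_append]; exact List.getLastD_concat ..
    rw [buildAddressSet.eq_def, dif_neg hlen, dif_neg hne, hdrop, hlast, ih,
        List.foldl_append, List.foldl_cons, List.foldl_nil, pv_foldl_append,
        List.nil_append, pvStep]

-- ===== VERDICT (by name: the statement is the Claim_ definition above) =====
theorem buildAddressSet_spec : Claim_equal_buildAddressSet := by
  intro arr _ hpre
  unfold Spec_buildAddressSet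
  match arr with
  | [] => exact absurd rfl hpre
  | x :: rest => rw [pv_A_cons, pv_alt_cons]
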